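-- pv_equiv track=rewrite | github.com/krizanicfranc-2725/projekt_rabljeni_avtomobili | analiza.py | najpogostejsi_model_in_avti
-- ===== SOURCE A (Python) =====
-- from collections import Counter
--
-- def najpogostejsi_model_in_avti(avti, ime_znamke):
--     '''Vrne seznam avtomobilov za najpogostejši model izbrane znamke.'''
--
--     modeli = []
--     pari = []
--
--     ime_znamke_lower = ime_znamke.lower()
--
--     for avto in avti:
--         znamka = avto.get('znamka', '').lower()
--         naziv = avto.get('naziv', '')
--         # Preverimo, ali se znamka ujema in ali naziv obstaja
--         if znamka != ime_znamke_lower or not naziv: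
--             continue
--
--         naziv_lower = naziv.lower()
--         # Če naziv začne z imenom znamke, odstranimo ta del, sicer vzamemo cel naziv
--         if naziv_lower.startswith(ime_znamke_lower):
--             ostanek = naziv[len(ime_znamke):].strip()
--         else:
--             ostanek = naziv.strip()
--
--         deli = ostanek.split()
--         if not deli:
--             continue
--
--         model = deli[0].lower()
--
--         modeli.append(model)
--         pari.append((model, avto))
--
--     if not modeli:
--         return []
--     # Poiščemo najpogostejši model
--     naj_model = Counter(modeli).most_common(1)[0][0]
--
--     return [avto for m, avto in pari if m == naj_model]
-- ===== SOURCE B (Python) =====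
-- def najpogostejsi_model_in_avti(avti, ime_znamke):
--     '''Vrne seznam avtomobilov za najpogostejši model izbrane znamke.'''
--     iml = ime_znamke.lower()
--     pari = []
--     for avto in avti:
--         if avto.get('znamka', '').lower() != iml:
--             continue
--         naziv = avto.get('naziv', '')
--         if not naziv:
--             continue
--         if naziv.lower().startswith(iml):
--             ostanek = naziv[len(ime_znamke):].strip()
--         else:
--             ostanek = naziv.strip()
--         deli = ostanek.split()
--         if deli:
--             pari.append((deli[0].lower(), avto))
--
--     # repeated partitioning: peel off the group of the first remaining model,
--     # keep it as champion only if strictly larger than the current champion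
--     # (so the earliest-seen model wins count ties, like Counter.most_common(1))
--     best = []
--     ps = pari
--     while ps:
--         m = ps[0][0]
--         mine = [a for mm, a in ps if mm == m]
--         ps = [p for p in ps if p[0] != m]
--         if len(best) < len(mine):
--             best = mine
--     return best
-- ===== Notes on version B (the rewrite author's own statement) =====
-- stated objective: alternative
-- what changed: Replaces A's Counter pass plus most_common plus a final filtering re-scan by repeated partitioning: peel off the whole group of the first remaining model each round and keep a running champion group (strict-greater replacement reproduces first-inserted tie-breaking), with no counting structure and no re-scan at the end.
import Mathlib
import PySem

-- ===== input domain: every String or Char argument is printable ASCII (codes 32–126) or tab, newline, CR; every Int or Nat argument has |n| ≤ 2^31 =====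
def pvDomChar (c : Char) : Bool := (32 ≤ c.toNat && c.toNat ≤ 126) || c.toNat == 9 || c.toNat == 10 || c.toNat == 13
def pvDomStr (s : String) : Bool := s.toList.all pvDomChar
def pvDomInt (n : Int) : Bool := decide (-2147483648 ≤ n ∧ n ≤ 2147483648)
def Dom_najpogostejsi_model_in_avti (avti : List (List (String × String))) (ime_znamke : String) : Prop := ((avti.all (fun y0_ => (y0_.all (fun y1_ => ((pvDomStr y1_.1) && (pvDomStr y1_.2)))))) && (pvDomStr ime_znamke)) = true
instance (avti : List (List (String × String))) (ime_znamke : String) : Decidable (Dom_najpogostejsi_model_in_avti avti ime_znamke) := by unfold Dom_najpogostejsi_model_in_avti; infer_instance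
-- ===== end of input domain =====

-- B replaces A's Counter + most_common + final re-scan by repeated partitioning with a running
-- champion group (strict replacement keeps the earliest model on ties); objective: alternative.

-- Shared per-car helper: both Source A and Source B run this identical brand-match / model-extraction
-- code for each car (inline in each loop body); transcribed once, used by both ports.
def pvModel? (ime_znamke : String) (avto : List (String × String)) : Option String :=
  let iml := PySem.Str.lower ime_znamke
  let znamka := PySem.Str.lower ((PySem.Dict.ofList avto).getD "znamka" "")
  let naziv := (PySem.Dict.ofList avto).getD "naziv" ""
  if znamka ≠ iml ∨ naziv = "" then none
  else
    let ostanek :=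
      if PySem.Str.startswith (PySem.Str.lower naziv) iml then
        PySem.Str.strip (PySem.Str.slice naziv (some (PySem.Str.len ime_znamke)) none)
      else PySem.Str.strip naziv
    match PySem.Str.split₀ ostanek with
    | [] => none
    | d :: _ => some (PySem.Str.lower d)

-- ===== PORT A =====
-- A's loop keeps two parallel lists (modeli, pari); Counter(modeli).most_common(1)[0][0] is the
-- first-inserted count-maximal key of the Counter, i.e. max? over the counter's items by count
-- (exact: most_common(1) = heapq.nlargest(1, items, by count), a first-maximal max; the [0]
-- index is guarded by the emptiness check, so the `none` branch below is unreachable).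
def najpogostejsi_model_in_avti (avti : List (List (String × String))) (ime_znamke : String) : List (List (String × String)) :=
  let acc := avti.foldl
    (fun (acc : List String × List (String × List (String × String))) avto =>
      match pvModel? ime_znamke avto with
      | none => acc
      | some model => (acc.1 ++ [model], acc.2 ++ [(model, avto)]))
    ([], [])
  if acc.1.isEmpty then []
  else
    match PySem.List.max? (PySem.Dict.counter acc.1).items (fun p => p.2) with
    | none => []
    | some p => (acc.2.filter (fun q => q.1 == p.1)).map (fun q => q.2)

-- ===== PORT B =====
-- Source B's while loop: peel off the whole group of the first remaining model; the champion `best`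
-- is replaced only when strictly smaller (so the earliest-seen model wins count ties).
def pvBestLoop (best : List (List (String × String))) (ps : List (String × List (String × String))) : List (List (String × String)) :=
  match ps with
  | [] => best
  | p0 :: t =>
    let m := p0.1
    let mine := ((p0 :: t).filter (fun q => q.1 == m)).map (fun q => q.2)
    let rest := (p0 :: t).filter (fun q => q.1 != m)
    pvBestLoop (if best.length < mine.length then mine else best) rest
termination_by ps.length
decreasing_by
  simp only [List.filter_cons, bne_self_eq_false, List.length_cons]
  exact Nat.lt_succ_of_le (List.length_filter_le _ _)

def najpogostejsi_model_in_avti_alt (avti : List (List (String × String))) (ime_znamke : String) : List (List (String × String)) :=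
  let pari := avti.foldl
    (fun (pari : List (String × List (String × String))) avto =>
      match pvModel? ime_znamke avto with
      | none => pari
      | some model => pari ++ [(model, avto)])
    []
  pvBestLoop [] pari

-- ===== PRECONDITION & SPEC =====
def Spec_najpogostejsi_model_in_avti (avti : List (List (String × String))) (ime_znamke : String) (out : List (List (String × String))) : Prop := out = najpogostejsi_model_in_avti_alt avti ime_znamke
instance (avti : List (List (String × String))) (ime_znamke : String) (out : List (List (String × String))) : Decidable (Spec_najpogostejsi_model_in_avti avti ime_znamke out) := by unfold Spec_najpogostejsi_model_in_avti; infer_instance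

-- ===== CLAIM (what is proved, stated in full; the proofs are below) =====
def Claim_equal_najpogostejsi_model_in_avti : Prop := ∀ (avti : List (List (String × String))) (ime_znamke : String), Dom_najpogostejsi_model_in_avti avti ime_znamke → Spec_najpogostejsi_model_in_avti avti ime_znamke (najpogostejsi_model_in_avti avti ime_znamke)

-- ===== LEMMAS AND PROOFS =====

-- The pairs (model, car) that both loops collect, as a filterMap.
def pvPairs (ime_znamke : String) (avti : List (List (String × String))) : List (String × List (String × String)) :=
  avti.filterMap (fun a => (pvModel? ime_znamke a).map (fun m => (m, a)))

lemma afold_eq (ime_znamke : String) (avti : List (List (String × String)))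
    (ms : List String) (ps : List (String × List (String × String))) :
    avti.foldl
      (fun (acc : List String × List (String × List (String × String))) avto =>
        match pvModel? ime_znamke avto with
        | none => acc
        | some model => (acc.1 ++ [model], acc.2 ++ [(model, avto)]))
      (ms, ps)
    = (ms ++ (pvPairs ime_znamke avti).map Prod.fst, ps ++ pvPairs ime_znamke avti) := by
  induction avti generalizing ms ps with
  | nil => simp [pvPairs]
  | cons a t ih =>
    simp only [List.foldl_cons, pvPairs, List.filterMap_cons]
    cases h : pvModel? ime_znamke a with
    | none => simpa [h, pvPairs] using ih ms ps
    | some m => simpa [h, pvPairs] using ih (ms ++ [m]) (ps ++ [(m, a)])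

lemma bfold_eq (ime_znamke : String) (avti : List (List (String × String)))
    (ps : List (String × List (String × String))) :
    avti.foldl
      (fun (pari : List (String × List (String × String))) avto =>
        match pvModel? ime_znamke avto with
        | none => pari
        | some model => pari ++ [(model, avto)])
      ps
    = ps ++ pvPairs ime_znamke avti := by
  induction avti generalizing ps with
  | nil => simp [pvPairs]
  | cons a t ih =>
    simp only [List.foldl_cons, pvPairs, List.filterMap_cons]
    cases h : pvModel? ime_znamke a with
    | none => simpa [h, pvPairs] using ih ps
    | some m => simpa [h, pvPairs] using ih (ps ++ [(m, a)])

lemma max?_map {α β κ : Type} [LT κ] [DecidableLT κ] (xs : List α) (g : α → β) (key : β → κ) :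
    PySem.List.max? (xs.map g) key = (PySem.List.max? xs (fun a => key (g a))).map g := by
  unfold PySem.List.max?
  rw [List.foldl_map]
  suffices h : ∀ (acc : Option α),
      List.foldl (fun acc x => match acc with
        | none => some (g x)
        | some m => if key m < key (g x) then some (g x) else some m) (acc.map g) xs
      = (List.foldl (fun acc x => match acc with
        | none => some x
        | some m => if key (g m) < key (g x) then some x else some m) acc xs).map g by
    simpa using h none
  induction xs with
  | nil => intro acc; simp
  | cons x t ih =>
    intro acc
    cases acc with
    | none => simpa using ih (some x)
    | some m =>
      by_cases h : key (g m) < key (g x) <;> simp only [List.foldl_cons, Option.map_some, h,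
        if_true, if_false] <;> [exact ih (some x); exact ih (some m)]

lemma max?_key_iff {α κ₁ κ₂ : Type} [LT κ₁] [DecidableLT κ₁] [LT κ₂] [DecidableLT κ₂]
    (xs : List α) (k1 : α → κ₁) (k2 : α → κ₂) (h : ∀ x y, k1 x < k1 y ↔ k2 x < k2 y) :
    PySem.List.max? xs k1 = PySem.List.max? xs k2 := by
  unfold PySem.List.max?
  apply PySem.List.foldl_congr_mem
  intro acc x _
  cases acc with
  | none => rfl
  | some m => simp only [h m x]

-- ---- max? with a Nat key: the running-champion fold and its characterisation ----

lemma foldl_opt {α : Type} (key : α → Nat) (t : List α) (x : α) :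
    List.foldl (fun acc y => match acc with
      | none => some y
      | some m => if key m < key y then some y else some m) (some x) t
    = some (t.foldl (fun m y => if key m < key y then y else m) x) := by
  induction t generalizing x with
  | nil => rfl
  | cons h t ih =>
    by_cases hc : key x < key h <;> simp only [List.foldl_cons, hc, if_true, if_false] <;> exact ih _

lemma max?_cons_nat {α : Type} (key : α → Nat) (x : α) (t : List α) :
    PySem.List.max? (x :: t) key = some (t.foldl (fun m y => if key m < key y then y else m) x) := by
  unfold PySem.List.max?
  simp only [List.foldl_cons]
  exact foldl_opt key t x

lemma foldl_champ {α : Type} (key : α → Nat) (t : List α) (x : α) :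
    t.foldl (fun m y => if key m < key y then y else m) x
    = match PySem.List.max? t key with
      | none => x
      | some y => if key x < key y then y else x := by
  induction t generalizing x with
  | nil => rfl
  | cons h t ih =>
    rw [List.foldl_cons, ih, max?_cons_nat, ih h]
    cases hm : PySem.List.max? t key with
    | none => simp
    | some y =>
      by_cases hab : key x < key h <;> by_cases hbc : key h < key y <;>
        by_cases hac : key x < key y <;> simp [hab, hbc, hac] <;> omega

lemma max?_congr_nat {α : Type} (k1 k2 : α → Nat) (xs : List α)
    (h : ∀ x ∈ xs, k1 x = k2 x) :
    PySem.List.max? xs k1 = PySem.List.max? xs k2 := by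
  induction xs with
  | nil => rfl
  | cons x t ih =>
    rw [max?_cons_nat, max?_cons_nat, foldl_champ, foldl_champ]
    rw [ih (fun y hy => h y (List.mem_cons_of_mem x hy))]
    cases hm : PySem.List.max? t k2 with
    | none => rfl
    | some y =>
      have hy : y ∈ t := PySem.List.max?_mem hm
      simp only [h x List.mem_cons_self, h y (List.mem_cons_of_mem x hy)]

-- ---- PySem.Set.ofList peels off its head together with the head's duplicates ----

lemma mem_add_of_mem {α : Type} [BEq α] [LawfulBEq α] (s : PySem.Set α) (y x : α)
    (h : x ∈ s) : x ∈ PySem.Set.add s y := by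
  unfold PySem.Set.add
  split <;> simp [h]

lemma foldl_add_skip {α : Type} [BEq α] [LawfulBEq α] (x : α) (l : List α) :
    ∀ s : PySem.Set α, x ∈ s →
      List.foldl PySem.Set.add s l = List.foldl PySem.Set.add s (l.filter (fun y => y != x)) := by
  induction l with
  | nil => intro s _; rfl
  | cons y t ih =>
    intro s hs
    by_cases hyx : y = x
    · subst hyx
      have : PySem.Set.add s y = s := by
        unfold PySem.Set.add
        simp [PySem.Set.contains, hs]
      simp only [List.filter_cons, bne_self_eq_false, List.foldl_cons, this]
      exact ih s hs
    · have hb : (y != x) = true := by simp [hyx]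
      simp only [List.filter_cons, hb, if_true, List.foldl_cons]
      exact ih (PySem.Set.add s y) (mem_add_of_mem s y x hs)

lemma foldl_add_cons {α : Type} [BEq α] [LawfulBEq α] (x : α) (l : List α) :
    ∀ s : List α, (∀ y ∈ l, y ≠ x) →
      List.foldl PySem.Set.add (x :: s) l = x :: List.foldl PySem.Set.add s l := by
  induction l with
  | nil => intro s _; rfl
  | cons y t ih =>
    intro s hl
    have hyx : y ≠ x := hl y List.mem_cons_self
    have : PySem.Set.add (x :: s) y = x :: PySem.Set.add s y := by
      unfold PySem.Set.add PySem.Set.contains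
      simp only [List.contains_cons]
      have : (y == x) = false := by simp [hyx]
      rw [this]
      split <;> simp_all
    rw [List.foldl_cons, this, List.foldl_cons]
    exact ih _ (fun y hy => hl y (List.mem_cons_of_mem _ hy))

lemma ofList_cons {α : Type} [BEq α] [LawfulBEq α] (x : α) (l : List α) :
    PySem.Set.ofList (x :: l) = x :: PySem.Set.ofList (l.filter (fun y => y != x)) := by
  have h1 : PySem.Set.ofList (x :: l) = List.foldl PySem.Set.add [x] l := by
    rw [PySem.Set.ofList_eq_foldl]; rfl
  rw [h1, foldl_add_skip x l [x] (List.mem_singleton.mpr rfl),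
      foldl_add_cons x _ [] (fun y hy => by simpa using (List.mem_filter.mp hy).2),
      PySem.Set.ofList_eq_foldl]

lemma ofList_eq_nil {α : Type} [BEq α] [LawfulBEq α] (l : List α)
    (h : PySem.Set.ofList l = []) : l = [] := by
  cases l with
  | nil => rfl
  | cons x t => rw [ofList_cons] at h; exact absurd h (by simp)

-- group length = model count
lemma glen (ps : List (String × List (String × String))) (k : String) :
    ((ps.filter (fun q => q.1 == k)).map (fun q => q.2)).length = (ps.map Prod.fst).count k := by
  rw [List.length_map, List.count, List.countP_map, List.countP_eq_length_filter]
  rfl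

-- ---- the B loop computes pvStep, "pvF with an accumulator" ----

-- What one round of the champion loop leaves: the group of the first count-maximal
-- model of ps, unless the incoming champion is at least as long.
def pvStep (best : List (List (String × String))) (ps : List (String × List (String × String))) : List (List (String × String)) :=
  match PySem.List.max? (PySem.Set.ofList (ps.map Prod.fst)) (fun k => (ps.map Prod.fst).count k) with
  | none => best
  | some m => if best.length < ((ps.filter (fun q => q.1 == m)).map (fun q => q.2)).length
              then (ps.filter (fun q => q.1 == m)).map (fun q => q.2) else best

lemma pvStep_none (best : List (List (String × String))) (ps : List (String × List (String × String)))
    (h : PySem.List.max? (PySem.Set.ofList (ps.map Prod.fst)) (fun k => (ps.map Prod.fst).count k) = none) :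
    pvStep best ps = best := by
  unfold pvStep; rw [h]

lemma pvStep_some (best : List (List (String × String))) (ps : List (String × List (String × String))) (m : String)
    (h : PySem.List.max? (PySem.Set.ofList (ps.map Prod.fst)) (fun k => (ps.map Prod.fst).count k) = some m) :
    pvStep best ps = if best.length < ((ps.filter (fun q => q.1 == m)).map (fun q => q.2)).length
                     then (ps.filter (fun q => q.1 == m)).map (fun q => q.2) else best := by
  unfold pvStep; rw [h]

lemma bestLoop_eq (n : Nat) : ∀ (ps : List (String × List (String × String)))
    (best : List (List (String × String))), ps.length ≤ n →
    pvBestLoop best ps = pvStep best ps := by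
  induction n with
  | zero =>
    intro ps best hlen
    have : ps = [] := List.length_eq_zero_iff.mp (Nat.le_zero.mp hlen)
    subst this
    rw [pvBestLoop, pvStep_none _ _ rfl]
  | succ n ih =>
    intro ps best hlen
    cases ps with
    | nil => rw [pvBestLoop, pvStep_none _ _ rfl]
    | cons p0 t =>
      rw [pvBestLoop]
      have hrest : (p0 :: t).filter (fun q => q.1 != p0.1) = t.filter (fun q => q.1 != p0.1) := by
        simp
      have hrlen : (t.filter (fun q => q.1 != p0.1)).length ≤ n := by
        have := List.length_filter_le (fun q => q.1 != p0.1) t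
        simpa using Nat.le_trans this (Nat.le_of_succ_le_succ hlen)
      rw [hrest, ih _ _ hrlen]
      have hms : (t.filter (fun q => q.1 != p0.1)).map Prod.fst
          = (t.map Prod.fst).filter (fun y => y != p0.1) := by
        rw [List.filter_map]
        rfl
      have hofl : PySem.Set.ofList ((p0 :: t).map Prod.fst)
          = p0.1 :: PySem.Set.ofList ((t.filter (fun q => q.1 != p0.1)).map Prod.fst) := by
        rw [List.map_cons, ofList_cons, hms]
      -- counts over the whole list agree with counts over the rest on the rest's models
      have hcount : ∀ x ∈ PySem.Set.ofList ((t.filter (fun q => q.1 != p0.1)).map Prod.fst),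
          ((p0 :: t).map Prod.fst).count x = ((t.filter (fun q => q.1 != p0.1)).map Prod.fst).count x := by
        intro x hx
        have hx' : x ∈ (t.map Prod.fst).filter (fun y => y != p0.1) := by
          rw [← hms]
          exact (PySem.Set.mem_ofList _ _).mp hx
        have hxne : x ≠ p0.1 := by simpa using (List.mem_filter.mp hx').2
        rw [hms, List.count_filter (by simp [hxne]), List.map_cons,
            List.count_cons_of_ne (Ne.symm hxne)]
      -- groups over the rest agree with groups over the whole list on models ≠ p0.1
      have hgroup : ∀ x, x ≠ p0.1 →
          (t.filter (fun q => q.1 != p0.1)).filter (fun q => q.1 == x)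
          = (p0 :: t).filter (fun q => q.1 == x) := by
        intro x hx
        rw [List.filter_filter]
        have h0 : (p0.1 == x) = false := by simpa using Ne.symm hx
        rw [List.filter_cons, h0]
        simp only [if_neg Bool.false_ne_true]
        apply List.filter_congr
        intro q _
        by_cases hq : q.1 = x
        · simp [hq, hx]
        · simp [hq]
      cases hmax : PySem.List.max? (PySem.Set.ofList ((t.filter (fun q => q.1 != p0.1)).map Prod.fst))
          (fun k => ((t.filter (fun q => q.1 != p0.1)).map Prod.fst).count k) with
      | none =>
        rw [pvStep_none _ _ hmax]
        have hr : t.filter (fun q => q.1 != p0.1) = [] :=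
          List.map_eq_nil_iff.mp (ofList_eq_nil _ ((PySem.List.max?_eq_none_iff _ _).mp hmax))
        have hm : PySem.List.max? (PySem.Set.ofList ((p0 :: t).map Prod.fst))
            (fun k => ((p0 :: t).map Prod.fst).count k) = some p0.1 := by
          rw [hofl, hr]
          rfl
        rw [pvStep_some _ _ _ hm]
      | some k =>
        have hk : k ∈ PySem.Set.ofList ((t.filter (fun q => q.1 != p0.1)).map Prod.fst) :=
          PySem.List.max?_mem hmax
        have hkne : k ≠ p0.1 := by
          have hmem := (PySem.Set.mem_ofList _ _).mp hk
          rw [hms] at hmem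
          simpa using (List.mem_filter.mp hmem).2
        have hm : PySem.List.max? (PySem.Set.ofList ((p0 :: t).map Prod.fst))
            (fun x => ((p0 :: t).map Prod.fst).count x)
            = some (if ((p0 :: t).map Prod.fst).count p0.1 < ((p0 :: t).map Prod.fst).count k
                    then k else p0.1) := by
          rw [hofl, max?_cons_nat, foldl_champ, max?_congr_nat _ _ _ hcount, hmax]
        rw [pvStep_some _ _ _ hmax, pvStep_some _ _ _ hm, hgroup k hkne]
        have e0 := glen (p0 :: t) p0.1
        have ek := glen (p0 :: t) k
        by_cases h1 : ((p0 :: t).map Prod.fst).count p0.1 < ((p0 :: t).map Prod.fst).count k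
        · rw [if_pos h1]
          split_ifs <;> first | rfl | omega
        · rw [if_neg h1]
          split_ifs <;> first | rfl | omega

-- ===== VERDICT (by name: the statement is the Claim_ definition above) =====
theorem najpogostejsi_model_in_avti_spec : Claim_equal_najpogostejsi_model_in_avti := by
  intro avti ime _
  unfold Spec_najpogostejsi_model_in_avti najpogostejsi_model_in_avti najpogostejsi_model_in_avti_alt
  rw [afold_eq, bfold_eq]
  set P := pvPairs ime avti with hP
  simp only [List.nil_append]
  rw [bestLoop_eq P.length P [] (Nat.le_refl _)]
  unfold pvStep
  -- reduce A's counter/max to max? over the distinct models with Nat count key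
  rw [PySem.Dict.items_counter, max?_map,
      max?_key_iff _ (fun k => ((P.map Prod.fst).count k : Int)) (fun k => (P.map Prod.fst).count k)
        (fun x y => Nat.cast_lt)]
  cases hmax : PySem.List.max? (PySem.Set.ofList (P.map Prod.fst)) (fun k => (P.map Prod.fst).count k) with
  | none =>
    have : P.map Prod.fst = [] := ofList_eq_nil _ ((PySem.List.max?_eq_none_iff _ _).mp hmax)
    simp [this]
  | some m =>
    have hm : m ∈ P.map Prod.fst := (PySem.Set.mem_ofList _ _).mp (PySem.List.max?_mem hmax)
    have hne : P.map Prod.fst ≠ [] := by intro h; rw [h] at hm; exact absurd hm (List.not_mem_nil)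
    have hcnt : 0 < (P.map Prod.fst).count m := List.count_pos_iff.mpr hm
    rw [if_neg (by simpa using hne)]
    simp only [Option.map_some, glen]
    rw [if_pos (by simpa [glen] using hcnt)]
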